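-- pv_equiv track=rewrite | github.com/cipher813/dsp | python/hackerrank/A4email.py | unique_domains
-- ===== SOURCE A (Python) =====
-- def unique_domains(emails):
--     listy = []
--     for e in emails:
--         findat = e.find('@')
--         frag = e[findat+1:]
--         if frag not in listy:
--             listy.append(frag)
--     return listy
-- ===== SOURCE B (Python) =====
-- def unique_domains(emails):
--     doms = [e[e.find('@')+1:] for e in emails]
--     return [d for i, d in enumerate(doms) if doms.index(d) == i]
-- ===== Notes on version B (the rewrite author's own statement) =====
-- stated objective: alternative
-- what changed: Removes A's growing accumulator and in-loop membership branch entirely: B first maps every email to its domain, then keeps a domain exactly when its position equals the first index of that domain in the full domain list (a stateless first-occurrence filter).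
import Mathlib
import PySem

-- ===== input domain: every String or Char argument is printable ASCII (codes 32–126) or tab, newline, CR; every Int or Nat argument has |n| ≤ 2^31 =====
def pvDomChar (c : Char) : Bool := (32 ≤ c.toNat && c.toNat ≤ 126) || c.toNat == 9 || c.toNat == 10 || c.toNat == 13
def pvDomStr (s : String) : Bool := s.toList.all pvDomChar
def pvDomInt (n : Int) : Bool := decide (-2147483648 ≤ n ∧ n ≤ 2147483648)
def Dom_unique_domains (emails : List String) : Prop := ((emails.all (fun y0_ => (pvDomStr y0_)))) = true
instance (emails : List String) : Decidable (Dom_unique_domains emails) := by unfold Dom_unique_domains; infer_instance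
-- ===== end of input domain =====

-- B drops A's accumulator and in-loop membership branch: it maps every email to its domain, then keeps a domain exactly when its position is the first index of that domain in the full domain list; same values (alternative decomposition, not faster).
-- ===== PORT A =====
def unique_domains (emails : List String) : List String :=
  emails.foldl (fun listy e =>
    let findat := PySem.Str.find e "@"
    let frag := PySem.Str.slice e (some (findat + 1)) none
    if frag ∈ listy then listy else listy ++ [frag]) []

-- ===== PORT B =====
def unique_domains_alt (emails : List String) : List String :=
  let doms := emails.map (fun e => PySem.Str.slice e (some (PySem.Str.find e "@" + 1)) none)
  (PySem.List.enumerate doms 0).filterMap (fun p =>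
    if (PySem.List.index? doms p.2).map Int.ofNat = some p.1 then some p.2 else none)

-- ===== PRECONDITION & SPEC =====
def Spec_unique_domains (emails : List String) (out : List String) : Prop := out = unique_domains_alt emails
instance (emails : List String) (out : List String) : Decidable (Spec_unique_domains emails out) := by unfold Spec_unique_domains; infer_instance

-- ===== CLAIM (what is proved, stated in full; the proofs are below) =====
def Claim_equal_unique_domains : Prop := ∀ (emails : List String), Dom_unique_domains emails → Spec_unique_domains emails (unique_domains emails)

-- ===== LEMMAS AND PROOFS =====

-- shifting the start of enumerate shifts every index
theorem pv_enumerate_shift {α : Type} (l : List α) (s : Int) :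
    PySem.List.enumerate l (s + 1) = (PySem.List.enumerate l s).map (fun p => (p.1 + 1, p.2)) := by
  induction l generalizing s with
  | nil => simp
  | cons x xs ih => simp [PySem.List.enumerate_cons, ih]

-- successor indices on both sides of the first-index test cancel
theorem pv_map_ofNat_succ (o : Option Nat) (k : Nat) :
    (Option.map Int.ofNat (Option.map (fun n => n + 1) o) = some ((0 : Int) + k + 1)) ↔
      (Option.map Int.ofNat o = some ((0 : Int) + k)) := by
  cases o <;> simp [Int.ofNat_eq_natCast]

-- the head of the list is never a later first occurrence
theorem pv_head_not_first (xs : List String) (x : String) (k : Nat) :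
    ¬ Option.map Int.ofNat (PySem.List.index? (x :: xs) x) = some ((0 : Int) + k + 1) := by
  rw [PySem.List.index?_cons_self]
  simp [Int.ofNat_eq_natCast]
  omega

-- A's seen-list fold over l started from pre is the first-occurrence filter of l, restricted to elements not already in pre
theorem pv_fold_eq_firstOcc (l pre : List String) :
    l.foldl (fun listy frag => if frag ∈ listy then listy else listy ++ [frag]) pre =
      pre ++ (PySem.List.enumerate l 0).filterMap (fun p =>
        if p.2 ∉ pre ∧ Option.map Int.ofNat (PySem.List.index? l p.2) = some p.1
        then some p.2 else none) := by
  induction l generalizing pre with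
  | nil => simp
  | cons x xs ih =>
    have hshift : PySem.List.enumerate xs (0 + 1) =
        (PySem.List.enumerate xs 0).map (fun p => (p.1 + 1, p.2)) := pv_enumerate_shift xs 0
    by_cases hx : x ∈ pre
    · simp only [List.foldl_cons]
      rw [if_pos hx, ih pre]
      congr 1
      rw [PySem.List.enumerate_cons, hshift]
      simp only [List.filterMap_cons, List.filterMap_map]
      rw [if_neg (by simp [hx])]
      apply List.filterMap_congr
      intro p hp
      obtain ⟨k, hk, rfl⟩ := (PySem.List.mem_enumerate_iff _ _ _).1 hp
      simp only [Function.comp]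
      by_cases hd : xs[k] ∈ pre
      · rw [if_neg (by simp [hd]), if_neg (by simp [hd])]
      · have hne : x ≠ xs[k] := fun h => hd (h ▸ hx)
        simp only [PySem.List.index?_cons_of_ne xs hne, pv_map_ofNat_succ]
    · simp only [List.foldl_cons]
      rw [if_neg hx, ih (pre ++ [x])]
      rw [PySem.List.enumerate_cons, hshift]
      simp only [List.filterMap_cons, List.filterMap_map]
      rw [if_pos ⟨hx, by rw [PySem.List.index?_cons_self]; rfl⟩]
      simp only [List.append_assoc, List.singleton_append]
      congr 2
      apply List.filterMap_congr
      intro p hp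
      obtain ⟨k, hk, rfl⟩ := (PySem.List.mem_enumerate_iff _ _ _).1 hp
      simp only [Function.comp]
      by_cases hex : xs[k] = x
      · rw [if_neg (by rintro ⟨hnm, -⟩; exact hnm (by simp [hex])),
            if_neg (by rintro ⟨-, h⟩; exact pv_head_not_first xs x k (hex ▸ h))]
      · have hne : x ≠ xs[k] := fun h => hex h.symm
        have hmem : (xs[k] ∉ pre ++ [x]) ↔ (xs[k] ∉ pre) := by simp [hex]
        simp only [PySem.List.index?_cons_of_ne xs hne, pv_map_ofNat_succ, hmem]

-- the fold over emails with the slice computed in the body is the fold over the mapped domain list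
theorem pv_foldl_slice_map (g : String → String) (l : List String) (init : List String) :
    List.foldl (fun listy e => if g e ∈ listy then listy else listy ++ [g e]) init l =
      List.foldl (fun listy frag => if frag ∈ listy then listy else listy ++ [frag]) init (l.map g) := by
  induction l generalizing init with
  | nil => rfl
  | cons x xs ih => simp only [List.map_cons, List.foldl_cons, ih]

-- ===== VERDICT (by name: the statement is the Claim_ definition above) =====
theorem unique_domains_spec : Claim_equal_unique_domains := by
  intro emails _
  unfold Spec_unique_domains unique_domains unique_domains_alt
  show List.foldl
      (fun listy e =>
        if PySem.Str.slice e (some (PySem.Str.find e "@" + 1)) none ∈ listy then listy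
        else listy ++ [PySem.Str.slice e (some (PySem.Str.find e "@" + 1)) none]) [] emails = _
  rw [pv_foldl_slice_map (fun e => PySem.Str.slice e (some (PySem.Str.find e "@" + 1)) none)]
  rw [pv_fold_eq_firstOcc]
  simp
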